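-- pv_equiv track=rewrite | github.com/VonLuisMarck/ThreatHunt_AI_Creator | src/ttp_mapper.py | _sort_by_tactic
-- ===== SOURCE A (Python) =====
-- from typing import List, Dict, Optional
--
-- def _sort_by_tactic(techniques: List[Dict]) -> List[Dict]:
--     """Ordena técnicas por orden de táctica MITRE (kill chain)."""
--     tactic_order = [
--         "Initial Access", "Execution", "Persistence",
--         "Privilege Escalation", "Defense Evasion", "Credential Access",
--         "Discovery", "Lateral Movement", "Collection",
--         "Command And Control", "Exfiltration", "Impact",
--     ]
--
--     def sort_key(t: Dict) -> int:
--         tactics = t.get("tactics", [])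
--         for tactic in tactics:
--             for i, ordered in enumerate(tactic_order):
--                 if ordered.lower() in tactic.lower():
--                     return i
--         return 99
--
--     return sorted(techniques, key=sort_key)
-- ===== SOURCE B (Python) =====
-- from typing import List, Dict, Optional
--
-- def _sort_by_tactic(techniques: List[Dict]) -> List[Dict]:
--     """Orders techniques by MITRE kill-chain tactic via a stable bucket distribution."""
--     tactic_order = [
--         "Initial Access", "Execution", "Persistence",
--         "Privilege Escalation", "Defense Evasion", "Credential Access",
--         "Discovery", "Lateral Movement", "Collection",
--         "Command And Control", "Exfiltration", "Impact",
--     ]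
--
--     def key_index(t: Dict) -> int:
--         for tactic in t.get("tactics", []):
--             for i, ordered in enumerate(tactic_order):
--                 if ordered.lower() in tactic.lower():
--                     return i
--         return 12  # unmatched techniques go in the last bucket
--
--     buckets = [[] for _ in range(13)]
--     for t in techniques:
--         buckets[key_index(t)].append(t)
--     return [t for bucket in buckets for t in bucket]
-- ===== Notes on version B (the rewrite author's own statement) =====
-- stated objective: alternative
-- what changed: B replaces sorted(techniques, key=sort_key) with a stable bucket distribution: the same tactic-key scan picks one of 13 fixed buckets, each technique is appended to its bucket in one forward pass, and the buckets are concatenated in kill-chain order (fallback bucket last).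
import Mathlib
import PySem

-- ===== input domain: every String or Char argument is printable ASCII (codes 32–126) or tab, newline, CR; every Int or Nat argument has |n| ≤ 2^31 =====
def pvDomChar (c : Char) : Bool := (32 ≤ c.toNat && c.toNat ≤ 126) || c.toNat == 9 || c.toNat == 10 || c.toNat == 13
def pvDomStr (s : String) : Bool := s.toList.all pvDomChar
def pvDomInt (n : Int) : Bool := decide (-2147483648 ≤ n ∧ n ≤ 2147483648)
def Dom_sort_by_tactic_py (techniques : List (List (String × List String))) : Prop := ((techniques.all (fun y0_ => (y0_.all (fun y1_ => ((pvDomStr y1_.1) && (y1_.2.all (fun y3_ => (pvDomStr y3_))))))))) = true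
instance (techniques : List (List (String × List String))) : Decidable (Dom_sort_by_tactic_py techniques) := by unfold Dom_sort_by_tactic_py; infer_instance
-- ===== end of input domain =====

-- B replaces the comparison sort with a stable 13-bucket distribution over the same tactic key (alternative decomposition, same observable result).


-- shared constant: the MITRE kill-chain tactic order (identical literal in both Pythons)
def pvTacticOrder : List String :=
  ["Initial Access", "Execution", "Persistence",
   "Privilege Escalation", "Defense Evasion", "Credential Access",
   "Discovery", "Lateral Movement", "Collection",
   "Command And Control", "Exfiltration", "Impact"]

-- shared inner scan (both Pythons contain this identical double loop):
-- for i, ordered in enumerate(tactic_order): if ordered.lower() in tactic.lower(): return i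
def pvScanOrder (tactic : String) : List (Int × String) → Option Int
  | [] => none
  | (i, ordered) :: rest =>
      if PySem.Str.isIn (PySem.Str.lower ordered) (PySem.Str.lower tactic) then some i
      else pvScanOrder tactic rest

-- for tactic in tactics: (inner scan, returning on first hit)
def pvScanTactics : List String → Option Int
  | [] => none
  | tactic :: rest =>
      match pvScanOrder tactic (PySem.List.enumerate pvTacticOrder 0) with
      | some i => some i
      | none => pvScanTactics rest

-- ===== PORT A =====
-- sort_key: the scan's index, 99 if no tactic matches
def sortKeyA (t : List (String × List String)) : Int :=
  match pvScanTactics (PySem.Dict.getD ⟨t⟩ "tactics" []) with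
  | some i => i
  | none => 99

def sort_by_tactic_py (techniques : List (List (String × List String))) : List (List (String × List String)) :=
  PySem.List.sorted techniques sortKeyA

-- ===== PORT B =====
-- key_index: the scan's index, 12 (the last bucket) if no tactic matches
-- .toNat is the Lean-side list index for the bucket (the scan's index is in 0..11, so it is exact)
def keyIdxB (t : List (String × List String)) : Nat :=
  ((pvScanTactics (PySem.Dict.getD ⟨t⟩ "tactics" [])).getD 12).toNat

def sort_by_tactic_py_alt (techniques : List (List (String × List String))) : List (List (String × List String)) :=
  let buckets := techniques.foldl
    (fun (bs : List (List (List (String × List String)))) t =>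
      bs.set (keyIdxB t) ((bs.getD (keyIdxB t) []) ++ [t]))
    (List.replicate 13 [])
  buckets.flatten

-- ===== PRECONDITION & SPEC =====
def Spec_sort_by_tactic_py (techniques : List (List (String × List String))) (out : List (List (String × List String))) : Prop := out = sort_by_tactic_py_alt techniques
instance (techniques : List (List (String × List String))) (out : List (List (String × List String))) : Decidable (Spec_sort_by_tactic_py techniques out) := by unfold Spec_sort_by_tactic_py; infer_instance

-- ===== CLAIM (what is proved, stated in full; the proofs are below) =====
def Claim_equal_sort_by_tactic_py : Prop := ∀ (techniques : List (List (String × List String))), Dom_sort_by_tactic_py techniques → Spec_sort_by_tactic_py techniques (sort_by_tactic_py techniques)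

-- ===== LEMMAS AND PROOFS =====

-- the canonical grouped form both ports compute: buckets 0..n-1 in order, stable within each
def canonUpTo (n : Nat) (l : List (List (String × List String))) : List (List (String × List String)) :=
  ((List.range n).map (fun i => l.filter (fun t => keyIdxB t == i))).flatten

theorem pvScanOrder_mem (tactic : String) (ps : List (Int × String)) (i : Int)
    (h : pvScanOrder tactic ps = some i) : i ∈ ps.map Prod.fst := by
  induction ps with
  | nil => simp [pvScanOrder] at h
  | cons p rest ih =>
    obtain ⟨a, b⟩ := p
    simp only [pvScanOrder] at h
    split at h
    · simp_all
    · simpa using Or.inr (by simpa using ih h)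

theorem pvScanTactics_lt (tactics : List String) (i : Int)
    (h : pvScanTactics tactics = some i) : 0 ≤ i ∧ i < 12 := by
  induction tactics with
  | nil => simp [pvScanTactics] at h
  | cons tac rest ih =>
    simp only [pvScanTactics] at h
    split at h
    · rename_i j hj
      have hm := pvScanOrder_mem tac _ j hj
      cases h
      have hfst : (PySem.List.enumerate pvTacticOrder 0).map Prod.fst
          = [0, 1, 2, 3, 4, 5, 6, 7, 8, 9, 10, 11] := by decide
      rw [hfst] at hm
      simp only [List.mem_cons, List.not_mem_nil, or_false] at hm
      rcases hm with h|h|h|h|h|h|h|h|h|h|h|h <;> omega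
    · exact ih h

theorem keyIdxB_le (t : List (String × List String)) : keyIdxB t ≤ 12 := by
  unfold keyIdxB
  cases h : pvScanTactics (PySem.Dict.getD ⟨t⟩ "tactics" []) with
  | none => simp
  | some i =>
    have := pvScanTactics_lt _ _ h
    simp only [Option.getD_some]
    omega

theorem sortKeyA_eq (t : List (String × List String)) :
    sortKeyA t = if keyIdxB t = 12 then (99 : Int) else (keyIdxB t : Int) := by
  unfold sortKeyA keyIdxB
  cases h : pvScanTactics (PySem.Dict.getD ⟨t⟩ "tactics" []) with
  | none => simp
  | some i =>
    have := pvScanTactics_lt _ _ h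
    simp only [Option.getD_some]
    rw [if_neg (by omega)]
    omega

theorem before_iff (x y : List (String × List String)) :
    (decide (sortKeyA x < sortKeyA y)) = true ↔ keyIdxB x < keyIdxB y := by
  have hx := keyIdxB_le x
  have hy := keyIdxB_le y
  rw [decide_eq_true_iff, sortKeyA_eq, sortKeyA_eq]
  split_ifs <;> omega

theorem mem_canonUpTo {n : Nat} {l : List (List (String × List String))}
    {y : List (String × List String)} (h : y ∈ canonUpTo n l) : keyIdxB y < n := by
  unfold canonUpTo at h
  simp only [List.mem_flatten, List.mem_map, List.mem_range] at h
  obtain ⟨b, ⟨i, hi, rfl⟩, hy⟩ := h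
  simp only [List.mem_filter, beq_iff_eq] at hy
  omega

theorem insertBy_append {α : Type} (before : α → α → Bool) (x : α) (X Y : List α)
    (h : ∀ y ∈ Y, before x y = true) :
    PySem.List.insertBy before x (X ++ Y) = PySem.List.insertBy before x X ++ Y := by
  induction X with
  | nil =>
    cases Y with
    | nil => rfl
    | cons b bs => simp [PySem.List.insertBy, h b (by simp)]
  | cons a X' ih =>
    simp only [List.cons_append, PySem.List.insertBy]
    split <;> simp [ih]

theorem canon_step (n : Nat) (l : List (List (String × List String)))
    (x : List (String × List String)) (hx : keyIdxB x < n) :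
    PySem.List.insertBy (fun a b => decide (sortKeyA a < sortKeyA b)) x (canonUpTo n l)
      = canonUpTo n (l ++ [x]) := by
  induction n with
  | zero => omega
  | succ m ih =>
    have hsplit : ∀ (ll : List (List (String × List String))),
        canonUpTo (m+1) ll = canonUpTo m ll ++ ll.filter (fun t => keyIdxB t == m) := by
      intro ll
      unfold canonUpTo
      rw [List.range_succ]
      simp
    rw [hsplit, hsplit]
    by_cases hxm : keyIdxB x = m
    · -- x lands in the last bucket: everything present has key ≤ keyIdx x, append at end
      rw [PySem.List.insertBy_of_forall_not_before]
      · have hfilter : (l ++ [x]).filter (fun t => keyIdxB t == m)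
            = l.filter (fun t => keyIdxB t == m) ++ [x] := by
          simp [List.filter_append, hxm]
        have hcanon : canonUpTo m (l ++ [x]) = canonUpTo m l := by
          unfold canonUpTo
          congr 1
          apply List.map_congr_left
          intro i hi
          simp only [List.mem_range] at hi
          simp only [List.filter_append]
          have : keyIdxB x ≠ i := by omega
          simp [this]
        rw [hfilter, hcanon, List.append_assoc]
      · intro y hy
        rcases List.mem_append.mp hy with hy | hy
        · have := mem_canonUpTo hy
          rw [← Bool.not_eq_true, before_iff]
          omega
        · simp only [List.mem_filter, beq_iff_eq] at hy
          rw [← Bool.not_eq_true, before_iff]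
          omega
    · -- x belongs in an earlier bucket: insert within the prefix, last bucket unchanged
      have hxm' : keyIdxB x < m := by omega
      rw [insertBy_append]
      · rw [ih hxm']
        congr 1
        have : keyIdxB x ≠ m := hxm
        simp [List.filter_append, this]
      · intro y hy
        simp only [List.mem_filter, beq_iff_eq] at hy
        rw [before_iff]
        omega

theorem portA_eq_canon (l : List (List (String × List String))) :
    sort_by_tactic_py l = canonUpTo 13 l := by
  unfold sort_by_tactic_py
  rw [PySem.List.sorted_eq_foldl_insertBy]
  induction l using List.reverseRecOn with
  | nil => rfl
  | append_singleton l x ih =>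
    rw [List.foldl_append, List.foldl_cons, List.foldl_nil, ih]
    exact canon_step 13 l x (Nat.lt_of_le_of_lt (keyIdxB_le x) (by omega))

theorem portB_buckets (l : List (List (String × List String))) :
    l.foldl (fun (bs : List (List (List (String × List String)))) t =>
        bs.set (keyIdxB t) ((bs.getD (keyIdxB t) []) ++ [t])) (List.replicate 13 [])
      = (List.range 13).map (fun i => l.filter (fun t => keyIdxB t == i)) := by
  induction l using List.reverseRecOn with
  | nil => rfl
  | append_singleton l x ih =>
    rw [List.foldl_append, List.foldl_cons, List.foldl_nil, ih]
    have hx : keyIdxB x < 13 := Nat.lt_of_le_of_lt (keyIdxB_le x) (by omega)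
    have hget : ((List.range 13).map (fun i => l.filter (fun t => keyIdxB t == i))).getD (keyIdxB x) []
        = l.filter (fun t => keyIdxB t == keyIdxB x) := by
      rw [List.getD_eq_getElem?_getD]
      simp [List.getElem?_map, List.getElem?_range hx]
    rw [hget]
    apply List.ext_getElem
    · simp
    · intro i h1 h2
      rw [List.getElem_set]
      simp only [List.length_map, List.length_range] at h2
      simp only [List.getElem_map, List.getElem_range]
      by_cases hik : keyIdxB x = i
      · subst hik
        simp [List.filter_append]
      · simp [hik, List.filter_append]

theorem portB_eq_canon (l : List (List (String × List String))) :
    sort_by_tactic_py_alt l = canonUpTo 13 l := by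
  unfold sort_by_tactic_py_alt canonUpTo
  rw [portB_buckets]

-- ===== VERDICT (by name: the statement is the Claim_ definition above) =====
theorem sort_by_tactic_py_spec : Claim_equal_sort_by_tactic_py := by
  intro techniques _
  unfold Spec_sort_by_tactic_py
  rw [portA_eq_canon, portB_eq_canon]
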